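-- pv_equiv track=rewrite | github.com/GProvan/TEP-Security | code/CADLAE (Pipeline Code)/experiments/localisationExperiment.py | generate_interval_lists
-- ===== SOURCE A (Python) =====
-- def generate_interval_lists(n):
--     interval_lists = []
--     start = 675
--     end = start + 10
--     i = 1
--     while i <= n:
--         interval_lists.append([start, end])
--         start = end + 675
--         end = start + (10+ 10*i)
--         i+=1
--     return interval_lists
-- ===== SOURCE B (Python) =====
-- def generate_interval_lists(n):
--     return [[5*i*i + 670*i, 5*i*i + 680*i] for i in range(1, n + 1)]
-- ===== Notes on version B (the rewrite author's own statement) =====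
-- stated objective: simpler
-- what changed: Replaced the stateful while-loop carrying start/end between iterations with a one-line closed-form list comprehension [5i^2+670i, 5i^2+680i] over range(1, n+1).
import Mathlib
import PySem

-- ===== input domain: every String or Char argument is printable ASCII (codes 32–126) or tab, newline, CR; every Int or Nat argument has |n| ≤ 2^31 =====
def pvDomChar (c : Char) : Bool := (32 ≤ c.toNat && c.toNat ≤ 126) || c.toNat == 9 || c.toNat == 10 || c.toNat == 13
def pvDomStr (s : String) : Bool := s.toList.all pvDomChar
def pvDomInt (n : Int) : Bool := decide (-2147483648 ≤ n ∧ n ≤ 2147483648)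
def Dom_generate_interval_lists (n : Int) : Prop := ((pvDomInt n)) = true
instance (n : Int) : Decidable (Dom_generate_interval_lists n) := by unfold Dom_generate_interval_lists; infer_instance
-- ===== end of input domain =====

-- B replaces A's stateful while-loop (start/end carried between iterations) with a
-- closed-form comprehension over range(1, n+1); objective: simpler.

-- ===== PORT A =====
-- the while-loop of A: state (acc, start, end_, i); runs while i ≤ n.
-- fuel only makes the recursion structural; it never runs out (fuel ≥ remaining iterations)
def pvALoop (n : Int) (fuel : Nat) (acc : List (List Int)) (start end_ i : Int) : List (List Int) :=
  match fuel with
  | 0 => acc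
  | f + 1 =>
    if i ≤ n then
      pvALoop n f (acc ++ [[start, end_]]) (end_ + 675) (end_ + 675 + (10 + 10 * i)) (i + 1)
    else acc

def generate_interval_lists (n : Int) : List (List Int) :=
  pvALoop n n.toNat [] 675 (675 + 10) 1

-- ===== PORT B =====
def generate_interval_lists_alt (n : Int) : List (List Int) :=
  (PySem.List.pyRange 1 (n + 1) 1).map (fun i => [5 * i * i + 670 * i, 5 * i * i + 680 * i])

-- ===== PRECONDITION & SPEC =====
def Spec_generate_interval_lists (n : Int) (out : List (List Int)) : Prop := out = generate_interval_lists_alt n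
instance (n : Int) (out : List (List Int)) : Decidable (Spec_generate_interval_lists n out) := by unfold Spec_generate_interval_lists; infer_instance

-- ===== CLAIM (what is proved, stated in full; the proofs are below) =====
def Claim_equal_generate_interval_lists : Prop := ∀ (n : Int), Dom_generate_interval_lists n → Spec_generate_interval_lists n (generate_interval_lists n)

-- ===== LEMMAS AND PROOFS =====

-- loop invariant: at counter i ≥ 1 the state is (5i²+670i, 5i²+680i), and the loop
-- appends exactly the closed-form rows for i, i+1, …, n
theorem pvALoop_closed (n : Int) : ∀ (fuel : Nat) (i : Int) (acc : List (List Int)),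
    1 ≤ i → (n + 1 - i).toNat ≤ fuel →
    pvALoop n fuel acc (5 * i * i + 670 * i) (5 * i * i + 680 * i) i
      = acc ++ (PySem.List.pyRange i (n + 1) 1).map
          (fun j => [5 * j * j + 670 * j, 5 * j * j + 680 * j]) := by
  intro fuel
  induction fuel with
  | zero =>
    intro i acc hi hk
    rw [pvALoop, PySem.List.pyRange_one_eq_nil (by omega)]
    simp
  | succ m ih =>
    intro i acc hi hk
    by_cases hin : i ≤ n
    · rw [pvALoop, if_pos hin]
      have hs : (5 * i * i + 680 * i) + 675 = 5 * (i+1) * (i+1) + 670 * (i+1) := by ring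
      have he : (5 * i * i + 680 * i) + 675 + (10 + 10 * i) = 5 * (i+1) * (i+1) + 680 * (i+1) := by ring
      rw [he, hs, ih (i+1) _ (by omega) (by omega),
          PySem.List.pyRange_one_cons (show i < n + 1 by omega)]
      simp
    · rw [pvALoop, if_neg hin, PySem.List.pyRange_one_eq_nil (by omega)]
      simp

theorem generate_interval_lists_spec : Claim_equal_generate_interval_lists := by
  intro n _
  unfold Spec_generate_interval_lists generate_interval_lists generate_interval_lists_alt
  have h := pvALoop_closed n n.toNat 1 [] (by omega) (by omega)
  norm_num at h
  exact h
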